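-- pv_equiv track=rewrite | github.com/walkingjohnny/academic-research-skills | scripts/adapters/zotero.py | strip_doi
-- ===== SOURCE A (Python) =====
-- def strip_doi(doi: str | None) -> str | None:
--     if not doi:
--         return None
--     doi = doi.strip()
--     for prefix in ("doi:", "DOI:", "https://doi.org/", "http://doi.org/"):
--         if doi.lower().startswith(prefix.lower()):
--             doi = doi[len(prefix):]
--             break
--     return doi.strip() or None
-- ===== SOURCE B (Python) =====
-- # Table-driven DFA: one char-by-char scan of the lowercased string; accepting
-- # states (4 = "doi:", 20 = "http(s)://doi.org/") give the prefix length to cut.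
-- _TRANS = {
--     (0, 'd'): 1, (0, 'h'): 5, (1, 'o'): 2, (2, 'i'): 3, (3, ':'): 4,
--     (5, 't'): 6, (6, 't'): 7, (7, 'p'): 8, (8, 's'): 9, (8, ':'): 10,
--     (9, ':'): 10, (10, '/'): 11, (11, '/'): 12, (12, 'd'): 13, (13, 'o'): 14,
--     (14, 'i'): 15, (15, '.'): 16, (16, 'o'): 17, (17, 'r'): 18, (18, 'g'): 19,
--     (19, '/'): 20,
-- }
-- _ACCEPT = {4, 20}
--
--
-- def _run(state, chars):
--     """Length of the accepted prefix starting in `state`, or 0 if none."""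
--     if not chars:
--         return 0
--     nxt = _TRANS.get((state, chars[0]))
--     if nxt is None:
--         return 0
--     if nxt in _ACCEPT:
--         return 1
--     n = _run(nxt, chars[1:])
--     return 1 + n if n else 0
--
--
-- def strip_doi(doi):
--     if not doi:
--         return None
--     s = doi.strip()
--     k = _run(0, list(s.lower()))
--     return s[k:].strip() or None
-- ===== Notes on version B (the rewrite author's own statement) =====
-- stated objective: alternative
-- what changed: Replaces the loop of startswith prefix tests by a table-driven character DFA: one recursive char-by-char scan of the lowercased string through an explicit transition table whose accepting states yield the prefix length to cut.
import Mathlib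
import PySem

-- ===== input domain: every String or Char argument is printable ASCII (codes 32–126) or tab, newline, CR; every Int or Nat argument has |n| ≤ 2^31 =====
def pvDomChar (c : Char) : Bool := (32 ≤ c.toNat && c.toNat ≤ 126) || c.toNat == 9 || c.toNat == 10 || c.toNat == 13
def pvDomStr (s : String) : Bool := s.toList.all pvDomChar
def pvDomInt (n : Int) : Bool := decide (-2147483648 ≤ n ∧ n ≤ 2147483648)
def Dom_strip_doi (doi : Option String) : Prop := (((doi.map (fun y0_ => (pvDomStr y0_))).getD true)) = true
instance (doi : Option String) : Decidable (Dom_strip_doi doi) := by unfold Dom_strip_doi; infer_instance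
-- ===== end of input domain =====

-- B replaces A's loop of startswith prefix tests by a table-driven character DFA:
-- one char-by-char scan of the lowercased string; accepting states give the cut length
-- (objective: alternative; same cost).

-- ===== PORT A =====
-- the for-loop over the prefix tuple, with break on the first match
-- (doi[len(prefix):] with a nonnegative index is List.drop, exact)
def stripLoopA (cs : List Char) : List (List Char) → List Char
  | [] => cs
  | p :: ps =>
    if PySem.Chars.startswith (PySem.Chars.lower cs) (PySem.Chars.lower p) then
      cs.drop p.length
    else stripLoopA cs ps

def strip_doi (doi : Option String) : Option String :=
  match doi with
  | none => none
  | some s =>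
    if s.toList = [] then none          -- `if not doi` on a string: empty is falsy
    else
      let cs := PySem.Chars.strip s.toList
      let cs' := stripLoopA cs ["doi:".toList, "DOI:".toList, "https://doi.org/".toList, "http://doi.org/".toList]
      let r := PySem.Chars.strip cs'
      if r = [] then none else some (String.ofList r)

-- ===== PORT B =====
-- Source B's constant transition dict _TRANS.get((state, ch)), ported as a hand-written
-- total lookup on the same 21 keys (exact: first/only match of a literal dict)
def dfaStep (st : Nat) (c : Char) : Option Nat :=
  if st = 0 then (if c = 'd' then some 1 else if c = 'h' then some 5 else none)
  else if st = 1 then (if c = 'o' then some 2 else none)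
  else if st = 2 then (if c = 'i' then some 3 else none)
  else if st = 3 then (if c = ':' then some 4 else none)
  else if st = 5 then (if c = 't' then some 6 else none)
  else if st = 6 then (if c = 't' then some 7 else none)
  else if st = 7 then (if c = 'p' then some 8 else none)
  else if st = 8 then (if c = 's' then some 9 else if c = ':' then some 10 else none)
  else if st = 9 then (if c = ':' then some 10 else none)
  else if st = 10 then (if c = '/' then some 11 else none)
  else if st = 11 then (if c = '/' then some 12 else none)
  else if st = 12 then (if c = 'd' then some 13 else none)
  else if st = 13 then (if c = 'o' then some 14 else none)
  else if st = 14 then (if c = 'i' then some 15 else none)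
  else if st = 15 then (if c = '.' then some 16 else none)
  else if st = 16 then (if c = 'o' then some 17 else none)
  else if st = 17 then (if c = 'r' then some 18 else none)
  else if st = 18 then (if c = 'g' then some 19 else none)
  else if st = 19 then (if c = '/' then some 20 else none)
  else none

-- Source B's _run: recursive scan, 0 = no accepted prefix, else its length
def dfaRun : Nat → List Char → Nat
  | _, [] => 0
  | st, c :: cs =>
    match dfaStep st c with
    | none => 0
    | some nxt =>
      if nxt = 4 ∨ nxt = 20 then 1
      else
        let n := dfaRun nxt cs
        if n = 0 then 0 else 1 + n

def strip_doi_alt (doi : Option String) : Option String :=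
  match doi with
  | none => none
  | some s =>
    if s.toList = [] then none
    else
      let cs := PySem.Chars.strip s.toList
      let k := dfaRun 0 (PySem.Chars.lower cs)
      let r := PySem.Chars.strip (cs.drop k)
      if r = [] then none else some (String.ofList r)

-- ===== PRECONDITION & SPEC =====
def Spec_strip_doi (doi : Option String) (out : Option String) : Prop := out = strip_doi_alt doi
instance (doi : Option String) (out : Option String) : Decidable (Spec_strip_doi doi out) := by unfold Spec_strip_doi; infer_instance

-- ===== CLAIM (what is proved, stated in full; the proofs are below) =====
def Claim_equal_strip_doi : Prop := ∀ (doi : Option String), Dom_strip_doi doi → Spec_strip_doi doi (strip_doi doi)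

-- ===== LEMMAS AND PROOFS =====

-- a single-transition non-accepting state chains a one-prefix characterization
lemma run_char (st n : Nat) (a : Char) (p : List Char) (k : Nat)
    (hstep : ∀ c, dfaStep st c = if c = a then some n else none)
    (hn4 : n ≠ 4) (hn20 : n ≠ 20)
    (hrec : ∀ l, dfaRun n l = if p <+: l then k else 0)
    (hk : k ≠ 0) :
    ∀ l, dfaRun st l = if (a :: p) <+: l then k + 1 else 0 := by
  intro l
  cases l with
  | nil => simp [dfaRun]
  | cons c cs =>
    simp only [dfaRun, hstep c]
    by_cases hca : c = a
    · subst hca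
      simp only [List.cons_prefix_cons, true_and]
      by_cases hp : p <+: cs
      · simp [hrec cs, hp, hn4, hn20, hk, Nat.add_comm]
      · simp [hrec cs, hp, hn4, hn20]
    · simp [hca, show a ≠ c from fun h => hca h.symm]

-- the same for a state whose continuation has a two-prefix characterization
lemma run_char2 (st n : Nat) (a : Char) (p q : List Char) (k j : Nat)
    (hstep : ∀ c, dfaStep st c = if c = a then some n else none)
    (hn4 : n ≠ 4) (hn20 : n ≠ 20)
    (hrec : ∀ l, dfaRun n l = if p <+: l then k else if q <+: l then j else 0)
    (hk : k ≠ 0) (hj : j ≠ 0) :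
    ∀ l, dfaRun st l = if (a :: p) <+: l then k + 1 else if (a :: q) <+: l then j + 1 else 0 := by
  intro l
  cases l with
  | nil => simp [dfaRun]
  | cons c cs =>
    simp only [dfaRun, hstep c]
    by_cases hca : c = a
    · subst hca
      simp only [List.cons_prefix_cons, true_and]
      by_cases hp : p <+: cs
      · simp [hrec cs, hp, hn4, hn20, hk, Nat.add_comm]
      · by_cases hq : q <+: cs <;> simp [hrec cs, hp, hq, hn4, hn20, hj, Nat.add_comm]
    · simp [hca, show a ≠ c from fun h => hca h.symm]

lemma run3 : ∀ l, dfaRun 3 l = if [':'] <+: l then 1 else 0 := by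
  intro l
  cases l with
  | nil => simp [dfaRun]
  | cons c cs =>
    simp only [dfaRun, show dfaStep 3 c = if c = ':' then some 4 else none from by
      simp [dfaStep]]
    by_cases hc : c = ':'
    · simp [hc]
    · simp [hc, show ':' ≠ c from fun h => hc h.symm]

lemma run1 : ∀ l, dfaRun 1 l = if ['o', 'i', ':'] <+: l then 3 else 0 :=
  run_char 1 2 'o' ['i', ':'] 2 (by intro c; simp [dfaStep]) (by decide) (by decide)
    (run_char 2 3 'i' [':'] 1 (by intro c; simp [dfaStep]) (by decide) (by decide)
      run3 (by decide)) (by decide)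

lemma run19 : ∀ l, dfaRun 19 l = if ['/'] <+: l then 1 else 0 := by
  intro l
  cases l with
  | nil => simp [dfaRun]
  | cons c cs =>
    simp only [dfaRun, show dfaStep 19 c = if c = '/' then some 20 else none from by
      simp [dfaStep]]
    by_cases hc : c = '/'
    · simp [hc]
    · simp [hc, show '/' ≠ c from fun h => hc h.symm]

lemma run10 : ∀ l, dfaRun 10 l = if "//doi.org/".toList <+: l then 10 else 0 :=
  run_char 10 11 '/' "/doi.org/".toList 9 (by intro c; simp [dfaStep]) (by decide) (by decide)
    (run_char 11 12 '/' "doi.org/".toList 8 (by intro c; simp [dfaStep]) (by decide) (by decide)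
      (run_char 12 13 'd' "oi.org/".toList 7 (by intro c; simp [dfaStep]) (by decide) (by decide)
        (run_char 13 14 'o' "i.org/".toList 6 (by intro c; simp [dfaStep]) (by decide) (by decide)
          (run_char 14 15 'i' ".org/".toList 5 (by intro c; simp [dfaStep]) (by decide) (by decide)
            (run_char 15 16 '.' "org/".toList 4 (by intro c; simp [dfaStep]) (by decide) (by decide)
              (run_char 16 17 'o' "rg/".toList 3 (by intro c; simp [dfaStep]) (by decide) (by decide)
                (run_char 17 18 'r' "g/".toList 2 (by intro c; simp [dfaStep]) (by decide) (by decide)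
                  (run_char 18 19 'g' "/".toList 1 (by intro c; simp [dfaStep]) (by decide) (by decide)
                    run19 (by decide)) (by decide)) (by decide)) (by decide)) (by decide))
            (by decide)) (by decide)) (by decide)) (by decide)

lemma run9 : ∀ l, dfaRun 9 l = if "://doi.org/".toList <+: l then 11 else 0 :=
  run_char 9 10 ':' "//doi.org/".toList 10 (by intro c; simp [dfaStep]) (by decide) (by decide)
    run10 (by decide)

lemma run8 : ∀ l, dfaRun 8 l =
    if "s://doi.org/".toList <+: l then 12
    else if "://doi.org/".toList <+: l then 11 else 0 := by
  intro l
  cases l with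
  | nil => simp [dfaRun]
  | cons c cs =>
    simp only [dfaRun,
      show dfaStep 8 c = if c = 's' then some 9 else if c = ':' then some 10 else none from by
        simp [dfaStep],
      show ("s://doi.org/".toList : List Char) = 's' :: "://doi.org/".toList from rfl,
      show ("://doi.org/".toList : List Char) = ':' :: "//doi.org/".toList from rfl,
      List.cons_prefix_cons]
    by_cases hs : c = 's'
    · subst hs
      simp [run9 cs] <;> split_ifs <;> omega
    · by_cases hc : c = ':'
      · subst hc
        simp [run10 cs, hs] <;> split_ifs <;> omega
      · simp [hs, hc, show 's' ≠ c from fun h => hs h.symm, show ':' ≠ c from fun h => hc h.symm]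

lemma run5 : ∀ l, dfaRun 5 l =
    if "ttps://doi.org/".toList <+: l then 15
    else if "ttp://doi.org/".toList <+: l then 14 else 0 :=
  run_char2 5 6 't' "tps://doi.org/".toList "tp://doi.org/".toList 14 13
    (by intro c; simp [dfaStep]) (by decide) (by decide)
    (run_char2 6 7 't' "ps://doi.org/".toList "p://doi.org/".toList 13 12
      (by intro c; simp [dfaStep]) (by decide) (by decide)
      (run_char2 7 8 'p' "s://doi.org/".toList "://doi.org/".toList 12 11
        (by intro c; simp [dfaStep]) (by decide) (by decide)
        run8 (by decide) (by decide)) (by decide) (by decide)) (by decide) (by decide)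

lemma run0 : ∀ l, dfaRun 0 l =
    if "doi:".toList <+: l then 4
    else if "https://doi.org/".toList <+: l then 16
    else if "http://doi.org/".toList <+: l then 15 else 0 := by
  intro l
  cases l with
  | nil => simp [dfaRun]
  | cons c cs =>
    simp only [dfaRun,
      show dfaStep 0 c = if c = 'd' then some 1 else if c = 'h' then some 5 else none from by
        simp [dfaStep],
      show ("doi:".toList : List Char) = 'd' :: ['o', 'i', ':'] from rfl,
      show ("https://doi.org/".toList : List Char) = 'h' :: "ttps://doi.org/".toList from rfl,
      show ("http://doi.org/".toList : List Char) = 'h' :: "ttp://doi.org/".toList from rfl,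
      List.cons_prefix_cons]
    by_cases hd : c = 'd'
    · subst hd
      simp [run1 cs] <;> split_ifs <;> omega
    · by_cases hh : c = 'h'
      · subst hh
        simp [run5 cs, hd] <;> split_ifs <;> omega
      · simp [hd, hh, show 'd' ≠ c from fun h => hd h.symm, show 'h' ≠ c from fun h => hh h.symm]

-- A's prefix loop cuts exactly the length the DFA reports
lemma core (cs : List Char) :
    stripLoopA cs ["doi:".toList, "DOI:".toList, "https://doi.org/".toList, "http://doi.org/".toList]
      = cs.drop (dfaRun 0 (PySem.Chars.lower cs)) := by
  simp only [stripLoopA, PySem.Chars.startswith_iff, run0 (PySem.Chars.lower cs),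
    show PySem.Chars.lower "doi:".toList = "doi:".toList from by decide,
    show PySem.Chars.lower "DOI:".toList = "doi:".toList from by decide,
    show PySem.Chars.lower "https://doi.org/".toList = "https://doi.org/".toList from by decide,
    show PySem.Chars.lower "http://doi.org/".toList = "http://doi.org/".toList from by decide]
  split_ifs <;> simp

-- ===== VERDICT (by name: the statement is the Claim_ definition above) =====
theorem strip_doi_spec : Claim_equal_strip_doi := by
  intro doi _
  unfold Spec_strip_doi strip_doi strip_doi_alt
  cases doi with
  | none => rfl
  | some s =>
    simp only []
    rw [core]
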